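-- pv_equiv track=rewrite | github.com/Ambogo2/LUX_Week-4-Assignment | dict_.py | closest_key
-- ===== SOURCE A (Python) =====
-- def closest_key(dict, value):
--     """finds the key with the input value closest to the beginning of the list
-- 	Args:
--         dict: A dictionary where keys are associated with lists of values.
--         value: The value to search for within the lists.
--
--      Returns:
--         key: The key corresponding to the list where the value appears closest
--              to the beginning.
--     """
--     closest = None
--     min_index = float('inf')
--
--     for key, values in dict.items():
--         if value in values:
--             index = values.index(value)
--
--             if index < min_index:
--                 min_index = index
--                 closest = key
--
--     return closest
-- ===== SOURCE B (Python) =====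
-- def closest_key(dict, value):
--     # Column-wise scan: walk index positions from 0 upward; at the first
--     # position where any list holds the value, return the first such key
--     # in insertion order.
--     max_len = 0
--     for values in dict.values():
--         if len(values) > max_len:
--             max_len = len(values)
--     for i in range(max_len):
--         for key, values in dict.items():
--             if i < len(values) and values[i] == value:
--                 return key
--     return None
-- ===== Notes on version B (the rewrite author's own statement) =====
-- stated objective: alternative
-- what changed: Replaces A's key-outer scan (running minimum of values.index(value) per key) with a position-outer scan: iterate column index i from 0 to the longest list's length and return the first key in insertion order whose list has the value at position i, so no running minimum or index() call is needed.
import Mathlib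
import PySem

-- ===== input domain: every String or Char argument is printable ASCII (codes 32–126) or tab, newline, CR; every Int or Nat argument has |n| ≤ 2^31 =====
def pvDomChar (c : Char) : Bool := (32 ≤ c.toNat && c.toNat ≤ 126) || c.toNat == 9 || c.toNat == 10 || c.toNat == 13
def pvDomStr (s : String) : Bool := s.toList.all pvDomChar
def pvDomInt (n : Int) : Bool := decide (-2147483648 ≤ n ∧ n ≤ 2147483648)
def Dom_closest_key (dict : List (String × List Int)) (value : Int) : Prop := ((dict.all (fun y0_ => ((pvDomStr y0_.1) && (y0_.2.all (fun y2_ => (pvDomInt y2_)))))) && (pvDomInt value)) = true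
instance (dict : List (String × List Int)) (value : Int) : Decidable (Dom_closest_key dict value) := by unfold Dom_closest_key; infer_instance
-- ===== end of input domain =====

-- B replaces A's key-outer scan with a position-outer column scan (same cost class; no running minimum).


-- ===== PORT A =====
-- 'index < min_index' where min_index starts at float('inf'): none models inf
def pyLtInf (i : Nat) (m : Option Nat) : Bool :=
  match m with
  | none => true
  | some m' => decide (i < m')

def closestLoop (value : Int) : List (String × List Int) → Option String → Option Nat → Option String
  | [], closest, _ => closest
  | (k, vs) :: rest, closest, minIdx =>
    if vs.contains value then
      let index := (PySem.List.index? vs value).getD 0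
      if pyLtInf index minIdx then closestLoop value rest (some k) (some index)
      else closestLoop value rest closest minIdx
    else closestLoop value rest closest minIdx

def closest_key (dict : List (String × List Int)) (value : Int) : Option String :=
  closestLoop value dict none none

-- ===== PORT B =====
def maxLenB (dict : List (String × List Int)) : Nat :=
  dict.foldl (fun m kv => if kv.2.length > m then kv.2.length else m) 0

-- the inner 'for key, values …: if i < len(values) and values[i] == value: return key'
def findAtB (dict : List (String × List Int)) (value : Int) (i : Nat) : Option String :=
  (dict.find? (fun kv => decide (i < kv.2.length) && (kv.2[i]? == some value))).map Prod.fst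

-- 'for i in range(max_len)' as structural recursion on the remaining count
def scanCols (dict : List (String × List Int)) (value : Int) (i : Nat) : Nat → Option String
  | 0 => none
  | fuel + 1 =>
    match findAtB dict value i with
    | some k => some k
    | none => scanCols dict value (i + 1) fuel

def closest_key_alt (dict : List (String × List Int)) (value : Int) : Option String :=
  scanCols dict value 0 (maxLenB dict)

-- ===== PRECONDITION & SPEC =====
def Spec_closest_key (dict : List (String × List Int)) (value : Int) (out : Option String) : Prop := out = closest_key_alt dict value
instance (dict : List (String × List Int)) (value : Int) (out : Option String) : Decidable (Spec_closest_key dict value out) := by unfold Spec_closest_key; infer_instance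

-- ===== CLAIM (what is proved, stated in full; the proofs are below) =====
def Claim_equal_closest_key : Prop := ∀ (dict : List (String × List Int)) (value : Int), Dom_closest_key dict value → Spec_closest_key dict value (closest_key dict value)

-- ===== LEMMAS AND PROOFS =====

theorem find?_congr_mem {α : Type} (l : List α) (p q : α → Bool)
    (h : ∀ a ∈ l, p a = q a) : l.find? p = l.find? q := by
  induction l with
  | nil => rfl
  | cons x t ih =>
    by_cases hx : p x = true
    · rw [List.find?_cons_of_pos hx, List.find?_cons_of_pos ((h x (by simp)) ▸ hx)]
    · have hx' : p x = false := by simpa using hx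
      rw [List.find?_cons_of_neg (by simp [hx']), List.find?_cons_of_neg (by simp [(h x (by simp)) ▸ hx']),
        ih (fun a ha => h a (by simp [ha]))]

theorem idx_mem {vs : List Int} {v : Int} {j : Nat}
    (h : PySem.List.index? vs v = some j) : v ∈ vs :=
  (PySem.List.index?_isSome_iff vs v).mp (by rw [h]; rfl)

theorem idx_of_mem {vs : List Int} {v : Int} (h : v ∈ vs) :
    ∃ j, PySem.List.index? vs v = some j :=
  Option.isSome_iff_exists.mp ((PySem.List.index?_isSome_iff vs v).mpr h)

theorem idx_getD {vs : List Int} {v : Int} {j : Nat}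
    (h : PySem.List.index? vs v = some j) :
    (PySem.List.index? vs v).getD 0 = j := by rw [h]; rfl

theorem idx_le_of_getElem? (vs : List Int) (v : Int) (j : Nat)
    (h : vs[j]? = some v) : ∃ i, PySem.List.index? vs v = some i ∧ i ≤ j := by
  obtain ⟨i, hi⟩ := idx_of_mem (List.mem_of_getElem? h)
  obtain ⟨hk, hv, hmin⟩ := PySem.List.getElem_of_index?_eq_some hi
  refine ⟨i, hi, ?_⟩
  by_contra hc
  push_neg at hc
  have hj : j < vs.length := (List.getElem?_eq_some_iff.mp h).1
  exact hmin j hc (List.getElem?_eq_some_iff.mp h).2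

-- unfolding find? over the A-side predicate on a cons cell
theorem findP_cons (value : Int) (i : Nat) (k : String) (vs : List Int) (t : List (String × List Int)) :
    List.find? (fun kv => PySem.List.index? kv.2 value == some i) ((k, vs) :: t) =
      (if PySem.List.index? vs value = some i then some (k, vs)
       else List.find? (fun kv => PySem.List.index? kv.2 value == some i) t) := by
  rw [List.find?_cons, show PySem.List.index? (k, vs).2 value = PySem.List.index? vs value from rfl]
  by_cases h : PySem.List.index? vs value = some i
  · have ht : (PySem.List.index? vs value == some i) = true := by rw [h]; simp
    rw [ht, if_pos h]
  · have hf : (PySem.List.index? vs value == some i) = false := by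
      simp only [beq_eq_false_iff_ne, ne_eq]
      exact h
    rw [hf, if_neg h]

-- A's loop never updates: result is the accumulator
theorem closestLoop_none (value : Int) (d : List (String × List Int)) :
    ∀ (c : Option String) (m : Option Nat),
    (∀ kv ∈ d, ∀ j, PySem.List.index? kv.2 value = some j → pyLtInf j m = false) →
    closestLoop value d c m = c := by
  induction d with
  | nil => intro c m _; rfl
  | cons kv t ih =>
    intro c m h
    obtain ⟨k, vs⟩ := kv
    rw [closestLoop]
    by_cases hc : vs.contains value = true
    · rw [if_pos hc]
      obtain ⟨j, hj⟩ := idx_of_mem (show value ∈ vs by simpa using hc)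
      show (if pyLtInf ((PySem.List.index? vs value).getD 0) m = true then
              closestLoop value t (some k) (some ((PySem.List.index? vs value).getD 0))
            else closestLoop value t c m) = c
      rw [idx_getD hj, h (k, vs) (by simp) j hj, if_neg (by simp)]
      exact ih c m (fun kv' hkv' => h kv' (by simp [hkv']))
    · rw [if_neg hc]
      exact ih c m (fun kv' hkv' => h kv' (by simp [hkv']))

-- A's loop when i is the least first-occurrence index beating m: result is the first key achieving i
theorem closestLoop_min (value : Int) (d : List (String × List Int)) :
    ∀ (c : Option String) (m : Option Nat) (i : Nat),
    pyLtInf i m = true →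
    (∃ kv ∈ d, PySem.List.index? kv.2 value = some i) →
    (∀ kv ∈ d, ∀ j, PySem.List.index? kv.2 value = some j → pyLtInf j m = true → i ≤ j) →
    closestLoop value d c m =
      (d.find? (fun kv => PySem.List.index? kv.2 value == some i)).map Prod.fst := by
  induction d with
  | nil =>
    intro c m i _ hex _
    simp at hex
  | cons kv t ih =>
    intro c m i hbeat hex hmin
    obtain ⟨k, vs⟩ := kv
    rw [closestLoop]
    cases hidx : PySem.List.index? vs value with
    | none =>
      have hnc : ¬ (vs.contains value = true) := by
        have hh : value ∉ vs := (PySem.List.index?_eq_none_iff vs value).mp hidx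
        simpa using hh
      rw [if_neg hnc, findP_cons value i k vs t,
        if_neg (by intro hcontra; rw [hidx] at hcontra; cases hcontra)]
      have hex' : ∃ kv ∈ t, PySem.List.index? kv.2 value = some i := by
        obtain ⟨kv', hkv', hkvi⟩ := hex
        rcases List.mem_cons.mp hkv' with heq | hmem
        · rw [heq] at hkvi; rw [show PySem.List.index? (k, vs).2 value = PySem.List.index? vs value from rfl, hidx] at hkvi; cases hkvi
        · exact ⟨kv', hmem, hkvi⟩
      exact ih c m i hbeat hex' (fun kv' h' => hmin kv' (by simp [h']))
    | some j =>
      have hc : vs.contains value = true := by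
        have hh : value ∈ vs := idx_mem hidx
        simpa using hh
      rw [if_pos hc]
      show (if pyLtInf j m = true then closestLoop value t (some k) (some j)
            else closestLoop value t c m) =
          Option.map Prod.fst (List.find? (fun kv => PySem.List.index? kv.2 value == some i) ((k, vs) :: t))
      rw [findP_cons value i k vs t]
      by_cases hbj : pyLtInf j m = true
      · rw [if_pos hbj]
        have hij : i ≤ j := hmin (k, vs) (by simp) j hidx hbj
        by_cases heq : j = i
        · rw [if_pos (by rw [hidx, heq])]
          rw [closestLoop_none value t (some k) (some j)
            (fun kv' hkv' j' hj' => by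
              simp only [pyLtInf, decide_eq_false_iff_not, not_lt]
              by_contra hlt
              push_neg at hlt
              have hb' : pyLtInf j' m = true := by
                cases m with
                | none => rfl
                | some m' =>
                  simp only [pyLtInf, decide_eq_true_eq] at hbj ⊢
                  omega
              have hle := hmin kv' (by simp [hkv']) j' hj' hb'
              omega)]
          rfl
        · have hilt : i < j := lt_of_le_of_ne hij (fun h => heq h.symm)
          rw [if_neg (by intro hcontra; rw [hidx] at hcontra; injection hcontra with hji; exact heq hji)]
          have hex' : ∃ kv ∈ t, PySem.List.index? kv.2 value = some i := by
            obtain ⟨kv', hkv', hkvi⟩ := hex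
            rcases List.mem_cons.mp hkv' with heq' | hmem
            · rw [heq'] at hkvi; rw [show PySem.List.index? (k, vs).2 value = PySem.List.index? vs value from rfl, hidx] at hkvi; cases hkvi; omega
            · exact ⟨kv', hmem, hkvi⟩
          exact ih (some k) (some j) i (by simp only [pyLtInf, decide_eq_true_eq]; omega) hex'
            (fun kv' hkv' j' hj' hb' => by
              apply hmin kv' (by simp [hkv']) j' hj'
              simp only [pyLtInf, decide_eq_true_eq] at hb'
              cases m with
              | none => rfl
              | some m' =>
                simp only [pyLtInf, decide_eq_true_eq] at hbj ⊢
                omega)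
      · have hbjf : pyLtInf j m = false := by simpa using hbj
        rw [if_neg (by simp [hbjf])]
        have hne : j ≠ i := by
          intro h; rw [h, hbeat] at hbjf; cases hbjf
        rw [if_neg (by intro hcontra; rw [hidx] at hcontra; injection hcontra with hji; exact hne hji)]
        have hex' : ∃ kv ∈ t, PySem.List.index? kv.2 value = some i := by
          obtain ⟨kv', hkv', hkvi⟩ := hex
          rcases List.mem_cons.mp hkv' with heq' | hmem
          · rw [heq'] at hkvi; rw [show PySem.List.index? (k, vs).2 value = PySem.List.index? vs value from rfl, hidx] at hkvi; cases hkvi; exact absurd rfl hne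
          · exact ⟨kv', hmem, hkvi⟩
        exact ih c m i hbeat hex' (fun kv' h' => hmin kv' (by simp [h']))

-- running max only grows
theorem foldl_maxlen_ge (d : List (String × List Int)) :
    ∀ (a : Nat), a ≤ d.foldl (fun m kv => if kv.2.length > m then kv.2.length else m) a := by
  induction d with
  | nil => intro a; exact le_rfl
  | cons x t ih =>
    intro a
    rw [List.foldl_cons]
    calc a ≤ (if x.2.length > a then x.2.length else a) := by split <;> omega
      _ ≤ _ := ih _

-- every list in d fits inside maxLenB
theorem le_maxLenB_aux (d : List (String × List Int)) :
    ∀ (a : Nat), ∀ kv ∈ d, kv.2.length ≤ d.foldl (fun m kv => if kv.2.length > m then kv.2.length else m) a := by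
  induction d with
  | nil => intro a kv h; simp at h
  | cons x t ih =>
    intro a kv h
    rw [List.foldl_cons]
    rcases List.mem_cons.mp h with heq | hmem
    · subst heq
      calc kv.2.length ≤ (if kv.2.length > a then kv.2.length else a) := by split <;> omega
        _ ≤ _ := foldl_maxlen_ge t _
    · exact ih _ kv hmem

theorem le_maxLenB (d : List (String × List Int)) (kv : String × List Int) (h : kv ∈ d) :
    kv.2.length ≤ maxLenB d := le_maxLenB_aux d 0 kv h

-- scanCols hits the first column with a match
theorem scanCols_eq (d : List (String × List Int)) (value : Int) (i : Nat)
    (hsome : (findAtB d value i).isSome = true) :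
    ∀ (fuel i0 : Nat), i0 ≤ i → i < i0 + fuel →
    (∀ j, i0 ≤ j → j < i → findAtB d value j = none) →
    scanCols d value i0 fuel = findAtB d value i := by
  intro fuel
  induction fuel with
  | zero => intro i0 h1 h2 _; exact absurd h2 (by omega)
  | succ f ih =>
    intro i0 h1 h2 hnone
    rw [scanCols]
    by_cases heq : i0 = i
    · subst heq
      cases h : findAtB d value i0 with
      | some k => rfl
      | none => rw [h] at hsome; cases hsome
    · have hlt : i0 < i := lt_of_le_of_ne h1 heq
      rw [hnone i0 le_rfl hlt]
      exact ih (i0 + 1) (by omega) (by omega) (fun j hj1 hj2 => hnone j (by omega) hj2)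

-- no column ever matches when the value occurs in no list
theorem scanCols_none (d : List (String × List Int)) (value : Int)
    (h : ∀ kv ∈ d, value ∉ kv.2) :
    ∀ (fuel i0 : Nat), scanCols d value i0 fuel = none := by
  intro fuel
  induction fuel with
  | zero => intro i0; rfl
  | succ f ih =>
    intro i0
    rw [scanCols]
    have hfind : findAtB d value i0 = none := by
      unfold findAtB
      rw [List.find?_eq_none.mpr]
      · rfl
      · intro kv hkv
        simp only [Bool.and_eq_true, not_and, beq_iff_eq, decide_eq_true_eq]
        intro _ hget
        exact absurd (List.mem_of_getElem? hget) (h kv hkv)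
    rw [hfind]
    exact ih (i0 + 1)

-- ===== VERDICT (by name: the statement is the Claim_ definition above) =====
theorem closest_key_spec : Claim_equal_closest_key := by
  intro d value _
  unfold Spec_closest_key closest_key closest_key_alt
  by_cases hex : ∃ kv ∈ d, value ∈ kv.2
  · -- there is a hit: let i be the least first-occurrence index over all lists
    have hexP : ∃ n, ∃ kv ∈ d, PySem.List.index? kv.2 value = some n := by
      obtain ⟨kv, hkv, hmem⟩ := hex
      obtain ⟨n, hn⟩ := idx_of_mem hmem
      exact ⟨n, kv, hkv, hn⟩
    classical
    have hi : ∃ kv ∈ d, PySem.List.index? kv.2 value = some (Nat.find hexP) := Nat.find_spec hexP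
    have hmin : ∀ kv ∈ d, ∀ j, PySem.List.index? kv.2 value = some j → Nat.find hexP ≤ j := by
      intro kv hkv j hj
      by_contra hc
      push_neg at hc
      exact Nat.find_min hexP hc ⟨kv, hkv, hj⟩
    set i := Nat.find hexP with hidef
    -- the two find? predicates agree on members of d
    have hcongr : ∀ kv ∈ d, ((fun kv => PySem.List.index? kv.2 value == some i) kv) =
        ((fun kv => decide (i < kv.2.length) && (kv.2[i]? == some value)) kv) := by
      intro kv hkv
      show (PySem.List.index? kv.2 value == some i) = (decide (i < kv.2.length) && (kv.2[i]? == some value))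
      cases hidx : PySem.List.index? kv.2 value with
      | none =>
        have hnm : value ∉ kv.2 := (PySem.List.index?_eq_none_iff kv.2 value).mp hidx
        have hr : (kv.2[i]? == some value) = false := by
          simp only [beq_eq_false_iff_ne, ne_eq]
          intro hget
          exact hnm (List.mem_of_getElem? hget)
        rw [hr, Bool.and_false]; rfl
      | some j =>
        obtain ⟨hjl, hjv, hjmin⟩ := PySem.List.getElem_of_index?_eq_some hidx
        have hij : i ≤ j := hmin kv hkv j hidx
        by_cases heq : j = i
        · subst heq
          rw [show (some i == some i) = true by simp]
          rw [show decide (i < kv.2.length) = true by simp [hjl]]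
          rw [show (kv.2[i]? == some value) = true by rw [List.getElem?_eq_getElem hjl, hjv]; simp]
          rfl
        · have hilt : i < j := lt_of_le_of_ne hij (fun h => heq h.symm)
          rw [show (some j == some i) = false by simp; omega]
          have hr : (kv.2[i]? == some value) = false := by
            simp only [beq_eq_false_iff_ne, ne_eq]
            intro hget
            have hil : i < kv.2.length := by omega
            rw [List.getElem?_eq_getElem hil] at hget
            exact hjmin i hilt (by injection hget)
          rw [hr, Bool.and_false]
    -- A side
    rw [closestLoop_min value d none none i rfl hi (fun kv hkv j hj _ => hmin kv hkv j hj)]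
    -- B side: column i is the first hit column and is within maxLenB
    obtain ⟨kvw, hkvw, hkvwi⟩ := hi
    obtain ⟨hklen, hkval, -⟩ := PySem.List.getElem_of_index?_eq_some hkvwi
    have hifuel : i < maxLenB d := lt_of_lt_of_le hklen (le_maxLenB d kvw hkvw)
    have hfind_eq : findAtB d value i =
        (d.find? (fun kv => PySem.List.index? kv.2 value == some i)).map Prod.fst := by
      unfold findAtB
      rw [find?_congr_mem d _ _ hcongr]
    have hsome : (findAtB d value i).isSome = true := by
      rw [hfind_eq, Option.isSome_map]
      rw [List.find?_isSome]
      exact ⟨kvw, hkvw, by show (PySem.List.index? kvw.2 value == some i) = true; rw [hkvwi]; simp⟩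
    rw [scanCols_eq d value i hsome (maxLenB d) 0 (Nat.zero_le i) (by omega)
      (fun j _ hj => by
        unfold findAtB
        rw [List.find?_eq_none.mpr]
        · rfl
        · intro kv hkv
          simp only [Bool.and_eq_true, not_and, beq_iff_eq, decide_eq_true_eq]
          intro _ hget
          obtain ⟨i', hi', hle⟩ := idx_le_of_getElem? kv.2 value j hget
          have hgei := hmin kv hkv i' hi'
          omega)]
    exact hfind_eq.symm
  · -- no list contains the value: both return none
    push_neg at hex
    rw [closestLoop_none value d none none
      (fun kv hkv j hj => absurd (idx_mem hj) (hex kv hkv))]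
    rw [scanCols_none d value hex (maxLenB d) 0]
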